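-- pv_equiv track=rewrite | github.com/RegCoDev/stromalytix | archive/v0.1.0-pre-pivot/core/bio_process_miner.py | _find_sequence_cut
-- ===== SOURCE A (Python) =====
-- from collections import defaultdict, Counter
--
-- def _find_sequence_cut(traces, activities):
--     """Check if activities can be partitioned into sequential groups."""
--     if len(activities) < 2:
--         return None
--
--     # Build ordering matrix
--     always_before = defaultdict(set)
--     for trace in traces:
--         for i, a in enumerate(trace):
--             for j in range(i + 1, len(trace)):
--                 always_before[a].add(trace[j])
--
--     # Try splitting into two: first group always before second
--     act_set = set(activities)
--     for i in range(1, len(activities)):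
--         first = set(activities[:i])
--         second = act_set - first
--         # Check: every activity in first always before every in second
--         valid = True
--         for a in first:
--             if not second.issubset(always_before.get(a, set())):
--                 valid = False
--                 break
--         if valid:
--             # Check second never before first
--             for b in second:
--                 if first & always_before.get(b, set()):
--                     valid = False
--                     break
--         if valid:
--             return [sorted(first), sorted(second)]
--     return None
-- ===== SOURCE B (Python) =====
-- def _find_sequence_cut(traces, activities):
--     """Check if activities can be partitioned into sequential groups."""
--     if len(activities) < 2:
--         return None
--
--     # Build the follows-relation (after) and its transpose (before) once,
--     # by a backward resp. forward sweep over each trace with a running set.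
--     after = {}
--     before = {}
--     for trace in traces:
--         seen = set()
--         for a in reversed(trace):
--             after.setdefault(a, set()).update(seen)
--             seen.add(a)
--         seen = set()
--         for a in trace:
--             before.setdefault(a, set()).update(seen)
--             seen.add(a)
--
--     # Sweep the boundary left to right, maintaining the first/second sets and
--     # the number of cross-boundary violations incrementally with set algebra.
--     # A pair (a in first, b in second) is fine iff b in after[a] and a not in
--     # after[b]; equivalently a in before[b] - after[b].
--     EMPTY = frozenset()
--     first = set()
--     second = set(activities)
--     violations = 0
--     for i in range(1, len(activities)):
--         x = activities[i - 1]
--         if x not in first: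
--             second.discard(x)
--             ax = after.get(x, EMPTY)
--             bx = before.get(x, EMPTY)
--             violations -= len(first) - len(first & (bx - ax))
--             first.add(x)
--             violations += len(second) - len(second & (ax - bx))
--         if violations == 0:
--             return [sorted(first), sorted(second)]
--     return None
-- ===== Notes on version B (the rewrite author's own statement) =====
-- stated objective: faster
-- what changed: B builds the follows-relation and its transpose by running-set backward/forward sweeps instead of A's per-pair inner loop, and replaces A's per-split O(n^2) subset/intersection re-check by a single boundary sweep that maintains the first/second sets and the cross-boundary violation count incrementally with set algebra.
import Mathlib
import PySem

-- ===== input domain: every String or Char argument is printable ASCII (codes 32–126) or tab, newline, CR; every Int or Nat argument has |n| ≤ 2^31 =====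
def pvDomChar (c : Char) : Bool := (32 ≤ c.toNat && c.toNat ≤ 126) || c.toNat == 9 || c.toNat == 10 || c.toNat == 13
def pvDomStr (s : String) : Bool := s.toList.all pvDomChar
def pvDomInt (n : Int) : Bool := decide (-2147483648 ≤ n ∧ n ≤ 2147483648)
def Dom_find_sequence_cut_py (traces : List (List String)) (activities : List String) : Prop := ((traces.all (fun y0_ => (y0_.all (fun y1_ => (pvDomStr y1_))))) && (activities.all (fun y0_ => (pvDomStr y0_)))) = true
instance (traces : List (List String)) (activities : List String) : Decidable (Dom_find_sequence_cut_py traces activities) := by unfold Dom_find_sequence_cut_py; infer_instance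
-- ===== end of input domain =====

-- B builds the follows-relation and its transpose by running-set sweeps and replaces
-- A's per-split subset/intersection re-check by an incrementally maintained
-- cross-boundary violation counter updated with set algebra; same return value.

-- ===== PORT A =====
-- always_before[a].add(trace[j]) on a defaultdict(set) = modify with default empty set
def pvBuildA (traces : List (List String)) : PySem.Dict String (PySem.Set String) :=
  traces.foldl (fun d trace =>
    (PySem.List.enumerate trace).foldl (fun d ia =>
      (PySem.List.pyRange (ia.1 + 1) (trace.length : Int)).foldl (fun d j =>
        -- trace[j]: j is always in range here, so pyGetD with a dummy default is exact
        d.modify ia.2 PySem.Set.empty (fun s => PySem.Set.add s (PySem.List.pyGetD trace j ""))) d) d)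
    PySem.Dict.empty

def pvLoopA (ab : PySem.Dict String (PySem.Set String)) (actSet : PySem.Set String)
    (activities : List String) : List Int → Option (List (List String))
  | [] => none
  | i :: rest =>
    let first : PySem.Set String := PySem.Set.ofList (PySem.List.slice activities none (some i))
    let second := PySem.Set.diff actSet first
    let valid := first.all (fun a => PySem.Set.issubset second (ab.getD a PySem.Set.empty))
    let valid := if valid then
        second.all (fun b => (PySem.Set.inter first (ab.getD b PySem.Set.empty)).isEmpty)
      else false
    if valid then
      some [PySem.List.sorted first (fun x => x), PySem.List.sorted second (fun x => x)]
    else pvLoopA ab actSet activities rest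

def find_sequence_cut_py (traces : List (List String)) (activities : List String) :
    Option (List (List String)) :=
  if activities.length < 2 then none
  else
    pvLoopA (pvBuildA traces) (PySem.Set.ofList activities) activities
      (PySem.List.pyRange 1 (activities.length : Int))

-- ===== PORT B =====
-- one sweep step: d.setdefault(a, set()).update(seen) mutates the stored set in
-- place (net effect: insert a (update (current value or empty) seen)); seen.add(a)
def pvSweepStep (ds : PySem.Dict String (PySem.Set String) × PySem.Set String) (a : String) :
    PySem.Dict String (PySem.Set String) × PySem.Set String :=
  (ds.1.insert a (PySem.Set.update (ds.1.getD a PySem.Set.empty) ds.2), ds.2.add a)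

-- after = backward sweep over each trace, before = forward sweep
def pvBuildB (traces : List (List String)) :
    PySem.Dict String (PySem.Set String) × PySem.Dict String (PySem.Set String) :=
  traces.foldl (fun dd trace =>
    ((trace.reverse.foldl pvSweepStep (dd.1, PySem.Set.empty)).1,
     (trace.foldl pvSweepStep (dd.2, PySem.Set.empty)).1))
    (PySem.Dict.empty, PySem.Dict.empty)

def pvLoopB (aft pre : PySem.Dict String (PySem.Set String)) (activities : List String) :
    List Int → PySem.Set String → PySem.Set String → Int → Option (List (List String))
  | [], _, _, _ => none
  | i :: rest, first, second, viol =>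
    -- activities[i-1]: 1 ≤ i < len(activities), so pyGetD with a dummy default is exact
    let x := PySem.List.pyGetD activities (i - 1) ""
    let st :=
      if first.contains x then (first, second, viol)
      else
        let ax := aft.getD x PySem.Set.empty
        let bx := pre.getD x PySem.Set.empty
        let second' := PySem.Set.discard second x
        let viol' := viol - ((first.length : Int)
          - ((PySem.Set.inter first (PySem.Set.diff bx ax)).length : Int))
        let first' := PySem.Set.add first x
        (first', second', viol' + ((second'.length : Int)
          - ((PySem.Set.inter second' (PySem.Set.diff ax bx)).length : Int)))
    if st.2.2 == 0 then
      some [PySem.List.sorted st.1 (fun y => y), PySem.List.sorted st.2.1 (fun y => y)]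
    else pvLoopB aft pre activities rest st.1 st.2.1 st.2.2

def find_sequence_cut_py_alt (traces : List (List String)) (activities : List String) :
    Option (List (List String)) :=
  if activities.length < 2 then none
  else
    pvLoopB (pvBuildB traces).1 (pvBuildB traces).2 activities
      (PySem.List.pyRange 1 (activities.length : Int))
      PySem.Set.empty (PySem.Set.ofList activities) 0

-- ===== PRECONDITION & SPEC =====
def Spec_find_sequence_cut_py (traces : List (List String)) (activities : List String) (out : Option (List (List String))) : Prop := out = find_sequence_cut_py_alt traces activities
instance (traces : List (List String)) (activities : List String) (out : Option (List (List String))) : Decidable (Spec_find_sequence_cut_py traces activities out) := by unfold Spec_find_sequence_cut_py; infer_instance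

-- ===== CLAIM (what is proved, stated in full; the proofs are below) =====
def Claim_equal_find_sequence_cut_py : Prop := ∀ (traces : List (List String)) (activities : List String), Dom_find_sequence_cut_py traces activities → Spec_find_sequence_cut_py traces activities (find_sequence_cut_py traces activities)

-- ===== LEMMAS AND PROOFS =====

-- 'y occurs after a in trace'
def pvAfterIn (t : List String) (a y : String) : Prop := ∃ p q, t = p ++ a :: q ∧ y ∈ q

-- the inner j-loop of A is a fold of add over the tail of the trace
theorem pvR1 (trace : List String) (k : Nat) (s : PySem.Set String) :
    (PySem.List.pyRange (k : Int) (trace.length : Int)).foldl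
        (fun s j => PySem.Set.add s (PySem.List.pyGetD trace j "")) s
      = (trace.drop k).foldl PySem.Set.add s := by
  by_cases h : k < trace.length
  · rw [PySem.List.pyRange_one_cons (by exact_mod_cast h),
        List.drop_eq_getElem_cons h]
    simp only [List.foldl_cons]
    rw [PySem.List.pyGetD_ofNat trace k "" h]
    have : ((k : Int) + 1) = ((k+1 : Nat) : Int) := by push_cast; ring
    rw [this, pvR1 trace (k+1)]
  · rw [PySem.List.pyRange_one_eq_nil (by exact_mod_cast Nat.le_of_not_lt h),
        List.drop_eq_nil_of_le (Nat.le_of_not_lt h)]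
    rfl
termination_by trace.length - k

-- getD through A's repeated-modify loop
theorem pvA1 (js : List Int) (a a' : String) (f : Int → String)
    (d : PySem.Dict String (PySem.Set String)) :
    (js.foldl (fun d j => d.modify a PySem.Set.empty (fun s => PySem.Set.add s (f j))) d).getD a' PySem.Set.empty
      = if a' = a then js.foldl (fun s j => PySem.Set.add s (f j)) (d.getD a PySem.Set.empty)
        else d.getD a' PySem.Set.empty := by
  induction js generalizing d with
  | nil =>
    simp only [List.foldl_nil]
    by_cases h : a' = a <;> simp [h]
  | cons j js ih =>
    simp only [List.foldl_cons]
    rw [ih]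
    rw [PySem.Dict.getD_modify, PySem.Dict.getD_modify]
    by_cases h : a' = a <;> simp [h]

-- splitting h :: t at an occurrence of a
theorem pvSplit_cons (h a y : String) (t s : List String) :
    (∃ p q, (h :: t : List String) = p ++ a :: q ∧ (y ∈ s ∨ y ∈ p)) ↔
      ((a = h ∧ y ∈ s) ∨ ∃ p q, t = p ++ a :: q ∧ (y ∈ s ∨ y = h ∨ y ∈ p)) := by
  constructor
  · rintro ⟨p, q, he, hy⟩
    cases p with
    | nil =>
      simp only [List.nil_append, List.cons.injEq] at he
      simp only [List.not_mem_nil, or_false] at hy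
      exact Or.inl ⟨he.1.symm, hy⟩
    | cons p0 p' =>
      simp only [List.cons_append, List.cons.injEq] at he
      refine Or.inr ⟨p', q, he.2, ?_⟩
      rcases hy with hy | hy
      · exact Or.inl hy
      · rcases List.mem_cons.mp hy with hy | hy
        · exact Or.inr (Or.inl (hy.trans he.1.symm))
        · exact Or.inr (Or.inr hy)
  · rintro (⟨rfl, hy⟩ | ⟨p, q, rfl, hy⟩)
    · exact ⟨[], t, rfl, Or.inl hy⟩
    · refine ⟨h :: p, q, rfl, ?_⟩
      rcases hy with hy | hy | hy
      · exact Or.inl hy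
      · exact Or.inr (List.mem_cons.mpr (Or.inl hy))
      · exact Or.inr (List.mem_cons.mpr (Or.inr hy))

-- membership through B's sweep
theorem pvSweep_char (l : List String) :
    ∀ (d : PySem.Dict String (PySem.Set String)) (seen : PySem.Set String) (a y : String),
    y ∈ (l.foldl pvSweepStep (d, seen)).1.getD a PySem.Set.empty
      ↔ (y ∈ d.getD a PySem.Set.empty ∨ ∃ p q, l = p ++ a :: q ∧ (y ∈ seen ∨ y ∈ p)) := by
  induction l with
  | nil =>
    intro d seen a y
    simp
  | cons h t ih =>
    intro d seen a y
    simp only [List.foldl_cons]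
    rw [show t.foldl pvSweepStep (pvSweepStep (d, seen) h)
        = t.foldl pvSweepStep ((d.insert h (PySem.Set.update (d.getD h PySem.Set.empty) seen)),
          PySem.Set.add seen h) from rfl]
    rw [ih, PySem.Dict.getD_insert, pvSplit_cons]
    by_cases hah : a = h
    · subst hah
      rw [if_pos rfl, PySem.Set.mem_update]
      constructor
      · rintro ((hd | hs) | ⟨p, q, hpq, hy⟩)
        · exact Or.inl hd
        · exact Or.inr (Or.inl ⟨rfl, hs⟩)
        · refine Or.inr (Or.inr ⟨p, q, hpq, ?_⟩)
          rcases hy with hy | hy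
          · rcases (PySem.Set.mem_add _ _ _).mp hy with hy | hy
            · exact Or.inl hy
            · exact Or.inr (Or.inl hy)
          · exact Or.inr (Or.inr hy)
      · rintro (hd | ⟨_, hs⟩ | ⟨p, q, hpq, hy⟩)
        · exact Or.inl (Or.inl hd)
        · exact Or.inl (Or.inr hs)
        · refine Or.inr ⟨p, q, hpq, ?_⟩
          rcases hy with hy | hy | hy
          · exact Or.inl ((PySem.Set.mem_add _ _ _).mpr (Or.inl hy))
          · exact Or.inl ((PySem.Set.mem_add _ _ _).mpr (Or.inr hy))
          · exact Or.inr hy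
    · rw [if_neg hah]
      constructor
      · rintro (hd | ⟨p, q, hpq, hy⟩)
        · exact Or.inl hd
        · refine Or.inr (Or.inr ⟨p, q, hpq, ?_⟩)
          rcases hy with hy | hy
          · rcases (PySem.Set.mem_add _ _ _).mp hy with hy | hy
            · exact Or.inl hy
            · exact Or.inr (Or.inl hy)
          · exact Or.inr (Or.inr hy)
      · rintro (hd | ⟨hcon, _⟩ | ⟨p, q, hpq, hy⟩)
        · exact Or.inl hd
        · exact absurd hcon hah
        · refine Or.inr ⟨p, q, hpq, ?_⟩
          rcases hy with hy | hy | hy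
          · exact Or.inl ((PySem.Set.mem_add _ _ _).mpr (Or.inl hy))
          · exact Or.inl ((PySem.Set.mem_add _ _ _).mpr (Or.inr hy))
          · exact Or.inr hy

-- reverse bridge: an occurrence with something before it in the reverse is an
-- occurrence with something after it in the trace
theorem pvRev_bridge (trace : List String) (a y : String) :
    (∃ p q, trace.reverse = p ++ a :: q ∧ y ∈ p) ↔ pvAfterIn trace a y := by
  constructor
  · rintro ⟨p, q, he, hy⟩
    have : trace = q.reverse ++ a :: p.reverse := by
      have := congrArg List.reverse he
      simpa [List.reverse_append] using this
    exact ⟨q.reverse, p.reverse, this, List.mem_reverse.mpr hy⟩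
  · rintro ⟨p, q, rfl, hy⟩
    refine ⟨q.reverse, p.reverse, by simp, List.mem_reverse.mpr hy⟩

-- forward bridge: 'a occurs before x' = 'x occurs after a'
theorem pvFwd_bridge (trace : List String) (x a : String) :
    (∃ p q, trace = p ++ x :: q ∧ a ∈ p) ↔ pvAfterIn trace a x := by
  constructor
  · rintro ⟨p, q, rfl, ha⟩
    obtain ⟨s, t, rfl⟩ := List.mem_iff_append.mp ha
    exact ⟨s, t ++ x :: q, by simp, by simp⟩
  · rintro ⟨p, q, rfl, hx⟩
    obtain ⟨s, t, rfl⟩ := List.mem_iff_append.mp hx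
    exact ⟨p ++ a :: s, t, by simp, by simp⟩

-- membership through A's per-trace enumerate fold
theorem pvAstep_char (trace : List String) :
    ∀ (t : List String) (st : Nat), t = trace.drop st →
    ∀ (d : PySem.Dict String (PySem.Set String)) (a y : String),
    y ∈ ((PySem.List.enumerate t (st : Int)).foldl (fun d ia =>
        (PySem.List.pyRange (ia.1 + 1) (trace.length : Int)).foldl (fun d j =>
          d.modify ia.2 PySem.Set.empty (fun s => PySem.Set.add s (PySem.List.pyGetD trace j ""))) d) d).getD
        a PySem.Set.empty
      ↔ (y ∈ d.getD a PySem.Set.empty ∨ ∃ p q, t = p ++ a :: q ∧ y ∈ q) := by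
  intro t
  induction t with
  | nil =>
    intro st _ d a y
    simp [PySem.List.enumerate]
  | cons h t ih =>
    intro st ht d a y
    have hdrop : t = trace.drop (st + 1) := by
      have h1 : List.drop 1 (List.drop st trace) = List.drop (st + 1) trace := List.drop_drop
      rw [← h1, ← ht]
      rfl
    rw [show PySem.List.enumerate (h :: t) (st : Int)
        = ((st : Int), h) :: PySem.List.enumerate t ((st : Int) + 1) from rfl]
    simp only [List.foldl_cons]
    rw [show ((st : Int) + 1) = ((st + 1 : Nat) : Int) by push_cast; ring]
    rw [ih (st + 1) hdrop]
    rw [pvA1, pvR1 trace (st + 1)]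
    rw [← hdrop]
    constructor
    · rintro (hd | ⟨p, q, hpq, hy⟩)
      · by_cases hah : a = h
        · rw [if_pos hah] at hd
          have := hd
          rw [show List.foldl PySem.Set.add (d.getD h PySem.Set.empty) t
              = PySem.Set.update (d.getD h PySem.Set.empty) t from rfl,
            PySem.Set.mem_update] at this
          rcases this with hmem | hmem
          · subst hah; exact Or.inl hmem
          · exact Or.inr ⟨[], t, by simp [hah], hmem⟩
        · rw [if_neg hah] at hd
          exact Or.inl hd
      · exact Or.inr ⟨h :: p, q, by simp [hpq], hy⟩
    · rintro (hd | ⟨p, q, hpq, hy⟩)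
      · by_cases hah : a = h
        · rw [if_pos hah]
          refine Or.inl ?_
          rw [show List.foldl PySem.Set.add (d.getD h PySem.Set.empty) t
              = PySem.Set.update (d.getD h PySem.Set.empty) t from rfl,
            PySem.Set.mem_update]
          subst hah
          exact Or.inl hd
        · rw [if_neg hah]
          exact Or.inl hd
      · cases p with
        | nil =>
          simp only [List.nil_append, List.cons.injEq] at hpq
          rw [if_pos hpq.1.symm]
          refine Or.inl ?_
          rw [show List.foldl PySem.Set.add (d.getD h PySem.Set.empty) t
              = PySem.Set.update (d.getD h PySem.Set.empty) t from rfl,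
            PySem.Set.mem_update]
          rw [hpq.2]
          exact Or.inr (by simp [hy])
        | cons p0 p' =>
          simp only [List.cons_append, List.cons.injEq] at hpq
          exact Or.inr ⟨p', q, hpq.2, hy⟩

-- a fold over the traces whose step adds exactly the R-related pairs
theorem pvFoldChar (step : PySem.Dict String (PySem.Set String) → List String → PySem.Dict String (PySem.Set String))
    (R : List String → String → String → Prop)
    (hstep : ∀ d t a y, y ∈ (step d t).getD a PySem.Set.empty
      ↔ (y ∈ d.getD a PySem.Set.empty ∨ R t a y)) :
    ∀ (ts : List (List String)) (d : PySem.Dict String (PySem.Set String)) (a y : String),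
    y ∈ (ts.foldl step d).getD a PySem.Set.empty
      ↔ (y ∈ d.getD a PySem.Set.empty ∨ ∃ t ∈ ts, R t a y) := by
  intro ts
  induction ts with
  | nil => intro d a y; simp
  | cons t0 ts ih =>
    intro d a y
    simp only [List.foldl_cons]
    rw [ih, hstep]
    simp only [List.mem_cons]
    constructor
    · rintro ((hd | hr) | ⟨t, ht, hr⟩)
      · exact Or.inl hd
      · exact Or.inr ⟨t0, Or.inl rfl, hr⟩
      · exact Or.inr ⟨t, Or.inr ht, hr⟩
    · rintro (hd | ⟨t, (rfl | ht), hr⟩)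
      · exact Or.inl (Or.inl hd)
      · exact Or.inl (Or.inr hr)
      · exact Or.inr ⟨t, ht, hr⟩

theorem pvAchar (traces : List (List String)) (a y : String) :
    y ∈ (pvBuildA traces).getD a PySem.Set.empty ↔ ∃ t ∈ traces, pvAfterIn t a y := by
  unfold pvBuildA
  rw [pvFoldChar _ (fun t a y => pvAfterIn t a y)
    (fun d t a y => by
      have := pvAstep_char t t 0 (by simp) d a y
      rw [Nat.cast_zero] at this
      exact this)]
  simp [PySem.Dict.getD_empty, PySem.Set.empty]

theorem pvBuildB_eq (traces : List (List String)) :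
    pvBuildB traces
      = (traces.foldl (fun d trace => (trace.reverse.foldl pvSweepStep (d, PySem.Set.empty)).1) PySem.Dict.empty,
         traces.foldl (fun d trace => (trace.foldl pvSweepStep (d, PySem.Set.empty)).1) PySem.Dict.empty) := by
  unfold pvBuildB
  exact PySem.List.foldl_prod_mk
    (fun d trace => (trace.reverse.foldl pvSweepStep (d, PySem.Set.empty)).1)
    (fun d trace => (trace.foldl pvSweepStep (d, PySem.Set.empty)).1)
    traces PySem.Dict.empty PySem.Dict.empty

theorem pvBaft_char (traces : List (List String)) (a y : String) :
    y ∈ (pvBuildB traces).1.getD a PySem.Set.empty ↔ ∃ t ∈ traces, pvAfterIn t a y := by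
  rw [pvBuildB_eq]
  rw [pvFoldChar _ (fun t a y => pvAfterIn t a y)
    (fun d t a y => by
      rw [pvSweep_char]
      rw [show (∃ p q, t.reverse = p ++ a :: q ∧ (y ∈ PySem.Set.empty ∨ y ∈ p))
          ↔ (∃ p q, t.reverse = p ++ a :: q ∧ y ∈ p) by
        constructor
        · rintro ⟨p, q, hpq, (hs | hp)⟩
          · exact absurd hs (List.not_mem_nil)
          · exact ⟨p, q, hpq, hp⟩
        · rintro ⟨p, q, hpq, hp⟩
          exact ⟨p, q, hpq, Or.inr hp⟩]
      rw [pvRev_bridge])]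
  simp [PySem.Dict.getD_empty, PySem.Set.empty]

theorem pvBpre_char (traces : List (List String)) (x a : String) :
    a ∈ (pvBuildB traces).2.getD x PySem.Set.empty ↔ ∃ t ∈ traces, pvAfterIn t a x := by
  rw [pvBuildB_eq]
  rw [pvFoldChar _ (fun t x a => pvAfterIn t a x)
    (fun d t x a => by
      rw [pvSweep_char]
      rw [show (∃ p q, t = p ++ x :: q ∧ (a ∈ PySem.Set.empty ∨ a ∈ p))
          ↔ (∃ p q, t = p ++ x :: q ∧ a ∈ p) by
        constructor
        · rintro ⟨p, q, hpq, (hs | hp)⟩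
          · exact absurd hs (List.not_mem_nil)
          · exact ⟨p, q, hpq, hp⟩
        · rintro ⟨p, q, hpq, hp⟩
          exact ⟨p, q, hpq, Or.inr hp⟩]
      rw [pvFwd_bridge])]
  simp [PySem.Dict.getD_empty, PySem.Set.empty]

-- the violation test, written with A's dict
def pvBad (ab : PySem.Dict String (PySem.Set String)) (a b : String) : Bool :=
  !((ab.getD a PySem.Set.empty).contains b) || (ab.getD b PySem.Set.empty).contains a

theorem pvBad_eq_false_iff (traces : List (List String)) (a b : String) :
    pvBad (pvBuildA traces) a b = false ↔
      (b ∈ (pvBuildA traces).getD a PySem.Set.empty ∧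
       a ∉ (pvBuildA traces).getD b PySem.Set.empty) := by
  unfold pvBad
  rw [Bool.or_eq_false_iff, Bool.not_eq_false', PySem.Set.contains_iff,
      Bool.eq_false_iff, Ne, PySem.Set.contains_iff]

-- the two set-difference tests of B agree pointwise with pvBad on A's dict
theorem pvKey1 (traces : List (List String)) (x a : String) :
    (PySem.Set.diff ((pvBuildB traces).2.getD x PySem.Set.empty)
      ((pvBuildB traces).1.getD x PySem.Set.empty)).contains a
    = !(pvBad (pvBuildA traces) a x) := by
  apply Bool.coe_iff_coe.mp
  rw [PySem.Set.contains_iff, PySem.Set.mem_diff, Bool.not_eq_true', pvBad_eq_false_iff]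
  rw [pvBpre_char, pvBaft_char, ← pvAchar, ← pvAchar]

theorem pvKey2 (traces : List (List String)) (x b : String) :
    (PySem.Set.diff ((pvBuildB traces).1.getD x PySem.Set.empty)
      ((pvBuildB traces).2.getD x PySem.Set.empty)).contains b
    = !(pvBad (pvBuildA traces) x b) := by
  apply Bool.coe_iff_coe.mp
  rw [PySem.Set.contains_iff, PySem.Set.mem_diff, Bool.not_eq_true', pvBad_eq_false_iff]
  rw [pvBaft_char, pvBpre_char, ← pvAchar, ← pvAchar]

theorem pv_length_countP (l : List String) (p : String → Bool) :
    l.length = l.countP p + l.countP (fun a => !(p a)) := by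
  induction l with
  | nil => simp
  | cons h t ih => by_cases hp : p h <;> simp [hp, ih] <;> omega

theorem pv_countP_congr (l : List String) (p q : String → Bool) (h : ∀ a ∈ l, p a = q a) :
    l.countP p = l.countP q := by
  induction l with
  | nil => rfl
  | cons x t ih =>
    simp only [List.countP_cons, h x List.mem_cons_self,
      ih (fun a ha => h a (List.mem_cons_of_mem _ ha))]

-- 'len(F) - len(F & T)' counts the elements of F outside T
theorem pvDelta (T : PySem.Set String) (F : List String) (p : String → Bool)
    (hkey : ∀ a, T.contains a = !(p a)) :
    (F.length : Int) - ((PySem.Set.inter F T).length : Int) = (F.countP p : Int) := by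
  have h1 : (PySem.Set.inter F T).length = F.countP (fun a => T.contains a) := by
    rw [List.countP_eq_length_filter]
    rfl
  have h2 : F.countP (fun a => T.contains a) = F.countP (fun a => !(p a)) :=
    pv_countP_congr _ _ _ (fun a _ => hkey a)
  have h3 := pv_length_countP F p
  rw [h1, h2]
  omega

theorem pv_countP_discard (S : List String) (x : String) (p : String → Bool)
    (hnd : S.Nodup) (hx : x ∈ S) :
    S.countP p = (PySem.Set.discard S x).countP p + (if p x then 1 else 0) := by
  have h1 : S.countP p = (x :: S.erase x).countP p :=
    List.Perm.countP_congr (List.perm_cons_erase hx) (fun y _ => rfl)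
  have h2 : S.erase x = S.filter (fun y => !(y == x)) := List.Nodup.erase_eq_filter hnd x
  rw [h1, List.countP_cons, h2]
  rfl

theorem pvBC_zero_iff (ab : PySem.Dict String (PySem.Set String)) (F S : List String) :
    (F.map (fun a => S.countP (pvBad ab a))).sum = 0 ↔
      ∀ a ∈ F, ∀ b ∈ S, ¬ pvBad ab a b = true := by
  rw [List.sum_eq_zero_iff_forall_eq_nat]
  constructor
  · intro h a ha b hb
    exact (List.countP_eq_zero.mp (h _ (List.mem_map_of_mem ha))) b hb
  · intro h n hn
    obtain ⟨a, ha, rfl⟩ := List.mem_map.mp hn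
    exact List.countP_eq_zero.mpr (fun b hb => h a ha b hb)

theorem pvValidA_iff (traces : List (List String)) (F S : List String) :
    ((F.all (fun a => PySem.Set.issubset S ((pvBuildA traces).getD a PySem.Set.empty))
      && S.all (fun b => (PySem.Set.inter F ((pvBuildA traces).getD b PySem.Set.empty)).isEmpty)) = true)
    ↔ ∀ a ∈ F, ∀ b ∈ S, ¬ pvBad (pvBuildA traces) a b = true := by
  rw [Bool.and_eq_true, List.all_eq_true, List.all_eq_true]
  constructor
  · rintro ⟨h1, h2⟩ a ha b hb
    have hb1 : b ∈ (pvBuildA traces).getD a PySem.Set.empty :=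
      (PySem.Set.issubset_iff _ _).mp (h1 a ha) b hb
    have hb2 : a ∉ (pvBuildA traces).getD b PySem.Set.empty := by
      have he := List.isEmpty_iff.mp (h2 b hb)
      intro hmem
      have : a ∈ PySem.Set.inter F ((pvBuildA traces).getD b PySem.Set.empty) :=
        (PySem.Set.mem_inter _ _ _).mpr ⟨ha, hmem⟩
      rw [he] at this
      exact absurd this (List.not_mem_nil)
    rw [Bool.not_eq_true, pvBad_eq_false_iff]
    exact ⟨hb1, hb2⟩
  · intro h
    constructor
    · intro a ha
      rw [PySem.Set.issubset_iff]
      intro b hb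
      exact ((pvBad_eq_false_iff traces a b).mp (Bool.not_eq_true _ ▸ h a ha b hb)).1
    · intro b hb
      rw [List.isEmpty_iff]
      have hall : ∀ a ∈ F, a ∉ (pvBuildA traces).getD b PySem.Set.empty := by
        intro a ha
        exact ((pvBad_eq_false_iff traces a b).mp (Bool.not_eq_true _ ▸ h a ha b hb)).2
      show List.filter _ F = []
      rw [List.filter_eq_nil_iff]
      intro a ha
      have h2 := hall a ha
      simp only [PySem.Set.contains_iff]
      exact h2

-- abbreviations for the state at boundary i
def pvF (activities : List String) (i : Nat) : PySem.Set String :=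
  PySem.Set.ofList (activities.take i)
def pvS (activities : List String) (i : Nat) : PySem.Set String :=
  PySem.Set.diff (PySem.Set.ofList activities) (pvF activities i)
def pvBC (ab : PySem.Dict String (PySem.Set String)) (activities : List String) (i : Nat) : Nat :=
  ((pvF activities i).map (fun a => (pvS activities i).countP (pvBad ab a))).sum

theorem pvS_step (activities : List String) (i : Nat) (x : String)
    (hFapp : pvF activities i = pvF activities (i-1) ++ [x]) :
    pvS activities i = PySem.Set.discard (pvS activities (i-1)) x := by
  unfold pvS
  rw [hFapp]
  simp only [PySem.Set.diff, PySem.Set.discard, List.filter_filter]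
  apply List.filter_congr
  intro c _
  show (!PySem.Set.contains (pvF activities (i-1) ++ [x]) c)
      = (!(c == x) && !PySem.Set.contains (pvF activities (i-1)) c)
  simp only [PySem.Set.contains_eq_listContains, List.contains_eq_mem, List.mem_append,
    List.mem_cons, List.not_mem_nil, or_false, Bool.decide_or, Bool.not_or]
  rw [Bool.and_comm]
  have : decide (c = x) = (c == x) := by by_cases h : c = x <;> simp [h]
  rw [this]

theorem pvBC_step (ab : PySem.Dict String (PySem.Set String)) (activities : List String)
    (i : Nat) (x : String)
    (hFapp : pvF activities i = pvF activities (i-1) ++ [x])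
    (hxS : x ∈ pvS activities (i-1)) :
    ((pvBC ab activities i : Nat) : Int)
      = ((pvBC ab activities (i-1) : Nat) : Int)
        - (((pvF activities (i-1)).countP (fun a => pvBad ab a x) : Nat) : Int)
        + (((pvS activities i).countP (fun b => pvBad ab x b) : Nat) : Int) := by
  have hnd : (pvS activities (i-1)).Nodup :=
    PySem.Set.nodup_diff _ _ (PySem.Set.nodup_ofList activities)
  have hS' : pvS activities i = PySem.Set.discard (pvS activities (i-1)) x :=
    pvS_step activities i x hFapp
  have hsplit : ∀ a, (pvS activities (i-1)).countP (pvBad ab a)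
      = (pvS activities i).countP (pvBad ab a) + (if pvBad ab a x then 1 else 0) := by
    intro a
    rw [hS']
    exact pv_countP_discard _ x _ hnd hxS
  have h1 : pvBC ab activities (i-1)
      = ((pvF activities (i-1)).map (fun a => (pvS activities i).countP (pvBad ab a))).sum
        + (pvF activities (i-1)).countP (fun a => pvBad ab a x) := by
    unfold pvBC
    rw [List.map_congr_left (fun a _ => hsplit a), List.sum_map_add,
        PySem.List.sum_map_ite_one_zero_nat]
  have h2 : pvBC ab activities i
      = ((pvF activities (i-1)).map (fun a => (pvS activities i).countP (pvBad ab a))).sum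
        + (pvS activities i).countP (pvBad ab x) := by
    unfold pvBC
    rw [hFapp, List.map_append, List.sum_append]
    simp
  rw [h1, h2]
  push_cast
  ring

theorem pv_finish (traces : List (List String)) (activities : List String) (i : Nat)
    (hnext : pvLoopA (pvBuildA traces) (PySem.Set.ofList activities) activities
        (PySem.List.pyRange ((i+1 : Nat) : Int) (activities.length : Int))
      = pvLoopB (pvBuildB traces).1 (pvBuildB traces).2 activities
        (PySem.List.pyRange ((i+1 : Nat) : Int) (activities.length : Int))
        (pvF activities i) (pvS activities i)
        ((pvBC (pvBuildA traces) activities i : Nat) : Int)) :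
    (if (if (List.all (pvF activities i) fun a =>
            (pvS activities i).issubset ((pvBuildA traces).getD a PySem.Set.empty)) = true then
          List.all (pvS activities i) fun b =>
            List.isEmpty ((pvF activities i).inter ((pvBuildA traces).getD b PySem.Set.empty))
        else false) = true then
      some [PySem.List.sorted (pvF activities i) fun x => x,
            PySem.List.sorted (pvS activities i) fun x => x]
    else
      pvLoopA (pvBuildA traces) (PySem.Set.ofList activities) activities
        (PySem.List.pyRange ((i+1 : Nat) : Int) (activities.length : Int)))
    = if ((((pvBC (pvBuildA traces) activities i : Nat) : Int) == 0) = true) then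
        some [PySem.List.sorted (pvF activities i) fun y => y,
              PySem.List.sorted (pvS activities i) fun y => y]
      else
        pvLoopB (pvBuildB traces).1 (pvBuildB traces).2 activities
          (PySem.List.pyRange ((i+1 : Nat) : Int) (activities.length : Int))
          (pvF activities i) (pvS activities i)
          ((pvBC (pvBuildA traces) activities i : Nat) : Int) := by
  have hcond : (if (List.all (pvF activities i) fun a =>
          (pvS activities i).issubset ((pvBuildA traces).getD a PySem.Set.empty)) = true then
        List.all (pvS activities i) fun b =>
          List.isEmpty ((pvF activities i).inter ((pvBuildA traces).getD b PySem.Set.empty))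
      else false)
      = ((List.all (pvF activities i) fun a =>
          (pvS activities i).issubset ((pvBuildA traces).getD a PySem.Set.empty))
        && List.all (pvS activities i) fun b =>
          List.isEmpty ((pvF activities i).inter ((pvBuildA traces).getD b PySem.Set.empty))) := by
    by_cases h : (List.all (pvF activities i) fun a =>
        (pvS activities i).issubset ((pvBuildA traces).getD a PySem.Set.empty)) = true
    · rw [if_pos h, h, Bool.true_and]
    · rw [Bool.not_eq_true] at h
      rw [if_neg (by rw [h]; exact Bool.false_ne_true), h, Bool.false_and]
  rw [hcond]
  by_cases hm : pvBC (pvBuildA traces) activities i = 0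
  · rw [if_pos, if_pos]
    · simp [hm]
    · exact (pvValidA_iff traces _ _).mpr ((pvBC_zero_iff _ _ _).mp hm)
  · rw [if_neg, if_neg]
    · exact hnext
    · simp [hm]
    · intro h
      exact hm ((pvBC_zero_iff _ _ _).mpr ((pvValidA_iff traces _ _).mp h))

theorem pv_main (traces : List (List String)) (activities : List String) :
    ∀ k i : Nat, activities.length - i ≤ k → 1 ≤ i →
    pvLoopA (pvBuildA traces) (PySem.Set.ofList activities) activities
        (PySem.List.pyRange (i : Int) (activities.length : Int))
      = pvLoopB (pvBuildB traces).1 (pvBuildB traces).2 activities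
        (PySem.List.pyRange (i : Int) (activities.length : Int))
        (pvF activities (i-1)) (pvS activities (i-1))
        ((pvBC (pvBuildA traces) activities (i-1) : Nat) : Int) := by
  intro k
  induction k with
  | zero =>
    intro i hk h1
    rw [PySem.List.pyRange_one_eq_nil (by exact_mod_cast (by omega : activities.length ≤ i))]
    rfl
  | succ k ih =>
    intro i hk h1
    by_cases hin : activities.length ≤ i
    · rw [PySem.List.pyRange_one_eq_nil (by exact_mod_cast hin)]
      rfl
    · have hlt : i < activities.length := by omega
      have hi1lt : i - 1 < activities.length := by omega
      rw [PySem.List.pyRange_one_cons (by exact_mod_cast hlt)]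
      have hx : PySem.List.pyGetD activities ((i:Int) - 1) ""
          = activities[i-1]'hi1lt := by
        rw [(by omega : ((i:Int) - 1) = ((i-1 : Nat) : Int))]
        exact PySem.List.pyGetD_ofNat activities (i-1) "" hi1lt
      set x := activities[i-1]'hi1lt with hxdef
      have htake : activities.take i = activities.take (i-1) ++ [x] := by
        rw [(by omega : i = (i-1) + 1), List.take_add_one,
            List.getElem?_eq_getElem hi1lt]
        rfl
      have hF : pvF activities i = (pvF activities (i-1)).add x := by
        unfold pvF
        rw [htake, PySem.Set.ofList_append_singleton]
      have hfirstA : PySem.Set.ofList (PySem.List.slice activities none (some (i:Int)))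
          = pvF activities i := by
        rw [PySem.List.slice_to activities (by positivity : (0:Int) ≤ (i:Int))]
        unfold pvF
        rw [Int.toNat_natCast]
      have hcast : ((i:Int) + 1) = (((i+1 : Nat)) : Int) := by push_cast; ring
      have hnext := ih (i+1) (by omega) (by omega)
      simp only [(by omega : (i+1) - 1 = i)] at hnext
      simp only [pvLoopA, pvLoopB, hx, hfirstA]
      rw [show (PySem.Set.ofList activities).diff (pvF activities i) = pvS activities i from rfl]
      rw [hcast]
      by_cases hmem : x ∈ pvF activities (i-1)
      · -- duplicate activity: the state does not change
        have hcontains : (pvF activities (i-1)).contains x = true :=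
          (PySem.Set.contains_iff _ _).mpr hmem
        rw [if_pos hcontains]
        dsimp only
        have hFeq : pvF activities i = pvF activities (i-1) := by
          rw [hF, PySem.Set.add_of_mem hmem]
        have hSeq : pvS activities i = pvS activities (i-1) := by
          unfold pvS; rw [hFeq]
        have hbceq : pvBC (pvBuildA traces) activities (i-1)
            = pvBC (pvBuildA traces) activities i := by
          unfold pvBC; rw [hFeq, hSeq]
        rw [← hFeq, ← hSeq, hbceq]
        exact pv_finish traces activities i hnext
      · -- new activity crosses the boundary: incremental update
        have hcontains : ¬ (pvF activities (i-1)).contains x = true := by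
          intro h
          exact hmem ((PySem.Set.contains_iff _ _).mp h)
        rw [if_neg hcontains]
        dsimp only
        have hFapp : pvF activities i = pvF activities (i-1) ++ [x] := by
          rw [hF, PySem.Set.add_of_not_mem hmem]
        have hxS : x ∈ pvS activities (i-1) := by
          unfold pvS
          rw [PySem.Set.mem_diff]
          exact ⟨(PySem.Set.mem_ofList _ _).mpr (by rw [hxdef]; exact List.getElem_mem _), hmem⟩
        have hS : pvS activities i = PySem.Set.discard (pvS activities (i-1)) x :=
          pvS_step activities i x hFapp
        have hBC := pvBC_step (pvBuildA traces) activities i x hFapp hxS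
        rw [pvDelta _ _ _ (pvKey1 traces x), pvDelta _ _ _ (pvKey2 traces x)]
        rw [← hF, ← hS, ← hBC]
        exact pv_finish traces activities i hnext

-- ===== VERDICT (by name: the statement is the Claim_ definition above) =====
theorem find_sequence_cut_py_spec : Claim_equal_find_sequence_cut_py := by
  intro traces activities _
  unfold Spec_find_sequence_cut_py find_sequence_cut_py find_sequence_cut_py_alt
  by_cases h : activities.length < 2
  · rw [if_pos h, if_pos h]
  · rw [if_neg h, if_neg h]
    have hmain := pv_main traces activities activities.length 1 (by omega) le_rfl
    have hF0 : pvF activities (1-1) = PySem.Set.empty := rfl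
    have hS0 : pvS activities (1-1) = PySem.Set.ofList activities := by
      unfold pvS pvF
      simp [PySem.Set.diff]
    have hB0 : ((pvBC (pvBuildA traces) activities (1-1) : Nat) : Int) = 0 := rfl
    rw [hF0, hS0, hB0, Nat.cast_one] at hmain
    exact hmain
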